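-- pv_equiv track=rewrite | github.com/alexwu2021/practice | Python/python3/leetcode/Medium/DistinctSubstringOfSizeK.py | sub_string_k
-- ===== SOURCE A (Python) =====
-- def sub_string_k(s, k):
--     if not s or k == 0:
--         return []
--
--     mp, res = {}, set()
--     start = 0
--
--     for i in range(len(s)):
--
--         # adjust start if the current char has appeared in the current window
--         if s[i] in mp and mp[s[i]] >= start:
--             start = mp[s[i]] + 1
--
--         mp[s[i]] = i
--         if i - start + 1 == k:
--             res.add(s[start:i + 1])
--             start += 1
--
--     return sorted(list(res))
-- ===== SOURCE B (Python) =====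
-- def sub_string_k(s, k):
--     if k <= 0 or k > len(s):
--         return []
--     wins = {s[i:i + k] for i in range(len(s) - k + 1) if len(set(s[i:i + k])) == k}
--     return sorted(wins)
-- ===== Notes on version B (the rewrite author's own statement) =====
-- stated objective: simpler
-- what changed: Replaced the sliding-window scan with a last-seen-index dict by a direct set-comprehension over all length-k windows keeping those whose characters are all distinct, then sorting.
import Mathlib
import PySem

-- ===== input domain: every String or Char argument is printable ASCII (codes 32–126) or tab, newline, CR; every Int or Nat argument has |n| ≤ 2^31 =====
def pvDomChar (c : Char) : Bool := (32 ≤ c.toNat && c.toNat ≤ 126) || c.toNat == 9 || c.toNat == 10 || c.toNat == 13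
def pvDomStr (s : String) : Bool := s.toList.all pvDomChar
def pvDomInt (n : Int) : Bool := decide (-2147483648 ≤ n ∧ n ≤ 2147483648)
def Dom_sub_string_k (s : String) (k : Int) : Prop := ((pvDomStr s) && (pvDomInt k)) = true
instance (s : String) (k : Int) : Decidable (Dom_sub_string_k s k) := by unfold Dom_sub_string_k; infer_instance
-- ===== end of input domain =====

-- B replaces A's sliding-window last-seen-index scan by a direct enumeration of all
-- length-k windows, keeping those whose characters are all distinct (objective: simpler).

-- ===== PORT A =====
-- loop body of A's for-loop (state = (mp, res, start), index i)
def stepA (cs : List Char) (k : Int)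
    (acc : PySem.Dict Char Int × PySem.Set String × Int) (i : Int) :
    PySem.Dict Char Int × PySem.Set String × Int :=
  let mp := acc.1
  let res := acc.2.1
  let start := acc.2.2
  let c := PySem.List.pyGetD cs i ' '
  -- 'if s[i] in mp and mp[s[i]] >= start: start = mp[s[i]] + 1'
  let start :=
    match PySem.Dict.get? mp c with
    | some j => if j ≥ start then j + 1 else start
    | none => start
  let mp := PySem.Dict.insert mp c i
  if i - start + 1 = k then
    (mp, PySem.Set.add res (String.ofList (PySem.List.slice cs (some start) (some (i + 1)))),
      start + 1)
  else
    (mp, res, start)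

def sub_string_k (s : String) (k : Int) : List String :=
  if s.toList = [] ∨ k = 0 then []
  else
    let cs := s.toList
    let st := (PySem.List.pyRange 0 (cs.length : Int) 1).foldl (stepA cs k)
      (PySem.Dict.empty, PySem.Set.empty, (0 : Int))
    PySem.List.sorted st.2.1 (fun x => x) false

-- ===== PORT B =====
def sub_string_k_alt (s : String) (k : Int) : List String :=
  if k ≤ 0 ∨ (s.toList.length : Int) < k then []
  else
    let cs := s.toList
    let wins := PySem.Set.ofList
      ((((PySem.List.pyRange 0 ((cs.length : Int) - k + 1) 1).map
            (fun i => PySem.List.slice cs (some i) (some (i + k)))).filter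
          (fun w => ((PySem.Set.ofList w).length : Int) = k)).map String.ofList)
    PySem.List.sorted wins (fun x => x) false

-- ===== PRECONDITION & SPEC =====
def Spec_sub_string_k (s : String) (k : Int) (out : List String) : Prop := out = sub_string_k_alt s k
instance (s : String) (k : Int) (out : List String) : Decidable (Spec_sub_string_k s k out) := by unfold Spec_sub_string_k; infer_instance

-- ===== CLAIM (what is proved, stated in full; the proofs are below) =====
def Claim_equal_sub_string_k : Prop := ∀ (s : String) (k : Int), Dom_sub_string_k s k → Spec_sub_string_k s k (sub_string_k s k)

-- ===== LEMMAS AND PROOFS =====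

-- segment cs[a:b] of the character list
def seg (cs : List Char) (a b : Nat) : List Char := (cs.take b).drop a
-- the length-kN window starting at j
def Wnd (cs : List Char) (kN j : Nat) : List Char := (cs.drop j).take kN
-- index of the last occurrence of c among the first m characters
def lastOccN (cs : List Char) (c : Char) : Nat → Option Nat
  | 0 => none
  | m + 1 => if cs.getD m ' ' = c then some m else lastOccN cs c m

-- the state after the first m iterations of A's loop
def stateA (cs : List Char) (k : Int) (m : Nat) :
    PySem.Dict Char Int × PySem.Set String × Int :=
  (PySem.List.pyRange 0 (m : Int) 1).foldl (stepA cs k)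
    (PySem.Dict.empty, PySem.Set.empty, (0 : Int))

-- A's loop invariant after m iterations
def InvA (cs : List Char) (k : Int) (m : Nat)
    (st : PySem.Dict Char Int × PySem.Set String × Int) : Prop :=
  (∀ c, st.1.get? c = (lastOccN cs c m).map (fun j => (j : Int))) ∧
  0 ≤ st.2.2 ∧ st.2.2 ≤ (m : Int) ∧ (m : Int) + 1 - k ≤ st.2.2 ∧
  (seg cs st.2.2.toNat m).Nodup ∧
  ((m : Int) + 1 - k < st.2.2 → 0 < st.2.2 → ¬ (seg cs (st.2.2.toNat - 1) m).Nodup) ∧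
  st.2.1.Nodup ∧
  (∀ w, w ∈ st.2.1 ↔ ∃ j : Nat, j + k.toNat ≤ m ∧ (Wnd cs k.toNat j).Nodup ∧
      w = String.ofList (Wnd cs k.toNat j))

theorem seg_eq_drop_take (cs : List Char) (a b : Nat) :
    seg cs a b = (cs.drop a).take (b - a) := by
  simp [seg, List.drop_take]

theorem Wnd_eq_seg (cs : List Char) (kN j : Nat) :
    Wnd cs kN j = seg cs j (j + kN) := by
  simp [seg_eq_drop_take, Wnd]

theorem seg_nodup_mono_left (cs : List Char) {a a' b : Nat} (h : a ≤ a')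
    (hn : (seg cs a b).Nodup) : (seg cs a' b).Nodup := by
  have : seg cs a' b = (seg cs a b).drop (a' - a) := by
    simp [seg, List.drop_drop]; congr 1; omega
  rw [this]
  exact hn.sublist (List.drop_sublist _ _)

theorem seg_not_nodup_mono_right (cs : List Char) {a b b' : Nat} (h : b ≤ b')
    (hn : ¬ (seg cs a b).Nodup) : ¬ (seg cs a b').Nodup := by
  intro hnb
  apply hn
  have heq : seg cs a b = (seg cs a b').take (b - a) := by
    rw [seg_eq_drop_take, seg_eq_drop_take, List.take_take]
    congr 1; omega
  rw [heq]
  exact hnb.sublist (List.take_sublist _ _)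

theorem seg_snoc (cs : List Char) {a b : Nat} (hab : a ≤ b) (hb : b < cs.length) :
    seg cs a (b + 1) = seg cs a b ++ [cs.getD b ' '] := by
  have h1 : cs.take (b + 1) = cs.take b ++ [cs.getD b ' '] := by
    rw [List.take_add_one, List.getElem?_eq_getElem hb, List.getD_eq_getElem cs ' ' hb]
    rfl
  rw [seg, h1, List.drop_append_of_le_length (by simp; omega)]
  rfl

theorem mem_seg (cs : List Char) {a i b : Nat} (hai : a ≤ i) (hib : i < b)
    (hi : i < cs.length) : cs.getD i ' ' ∈ seg cs a b := by
  rw [seg_eq_drop_take]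
  have hlen : i - a < ((cs.drop a).take (b - a)).length := by
    simp [List.length_take, List.length_drop]; omega
  have hval : ((cs.drop a).take (b - a))[i - a]'hlen = cs.getD i ' ' := by
    rw [List.getElem_take, List.getElem_drop, List.getD_eq_getElem cs ' ' hi]
    congr 1; omega
  exact hval ▸ List.getElem_mem hlen

theorem mem_seg_elim (cs : List Char) {a b : Nat} {x : Char} (hx : x ∈ seg cs a b) :
    ∃ i : Nat, a ≤ i ∧ i < b ∧ i < cs.length ∧ cs.getD i ' ' = x := by
  rw [seg_eq_drop_take] at hx
  obtain ⟨idx, hidx, hval⟩ := List.getElem_of_mem hx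
  have hb : idx < b - a ∧ idx < cs.length - a := by
    have := hidx; simp [List.length_take, List.length_drop] at this; omega
  refine ⟨a + idx, by omega, by omega, by omega, ?_⟩
  rw [List.getD_eq_getElem cs ' ' (by omega), ← hval]
  rw [List.getElem_take, List.getElem_drop]

theorem seg_cons (cs : List Char) {a b : Nat} (hab : a < b) (hb : b ≤ cs.length) :
    seg cs a b = cs.getD a ' ' :: seg cs (a + 1) b := by
  have hlen : a < (cs.take b).length := by simp [List.length_take]; omega
  rw [seg, List.drop_eq_getElem_cons hlen]
  congr 1
  rw [List.getElem_take, List.getD_eq_getElem cs ' ' (by omega)]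

theorem lastOccN_spec (cs : List Char) (c : Char) (m : Nat) :
    ((lastOccN cs c m = none → ∀ i < m, cs.getD i ' ' ≠ c) ∧
     (∀ j, lastOccN cs c m = some j →
        j < m ∧ cs.getD j ' ' = c ∧ ∀ i, j < i → i < m → cs.getD i ' ' ≠ c)) := by
  induction m with
  | zero => exact ⟨fun _ i hi => absurd hi (by omega), fun j h => by simp [lastOccN] at h⟩
  | succ m ih =>
    constructor
    · intro h i hi
      simp only [lastOccN] at h
      split at h
      · exact absurd h (by simp)
      · rcases Nat.lt_succ_iff_lt_or_eq.mp hi with hi' | hi'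
        · exact ih.1 h i hi'
        · subst hi'; assumption
    · intro j h
      simp only [lastOccN] at h
      split at h
      · rename_i hc
        cases h
        exact ⟨by omega, hc, fun i h1 h2 => by omega⟩
      · rename_i hc
        obtain ⟨h1, h2, h3⟩ := ih.2 j h
        refine ⟨by omega, h2, fun i hji him => ?_⟩
        rcases Nat.lt_succ_iff_lt_or_eq.mp him with hi' | hi'
        · exact h3 i hji hi'
        · subst hi'; exact hc

-- B's deduplication test: a list of length kN has kN distinct elements iff it is Nodup
theorem ofList_sublist (w : List Char) : (PySem.Set.ofList w).Sublist w := by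
  induction w with
  | nil => simp [PySem.Set.ofList_nil]
  | cons x xs ih =>
    rw [PySem.Set.ofList_cons]
    refine List.Sublist.cons₂ x (List.Sublist.trans ?_ ih)
    simp [PySem.Set.discard]

theorem ofList_length_iff (w : List Char) :
    (PySem.Set.ofList w).length = w.length ↔ w.Nodup := by
  constructor
  · intro h
    have := (ofList_sublist w).eq_of_length h
    rw [← this]
    exact PySem.Set.nodup_ofList w
  · intro h
    rw [PySem.Set.ofList_eq_self_of_nodup w h]



theorem step_preserves (cs : List Char) (k : Int) (hk : 1 ≤ k) (m : Nat)
    (hm : m < cs.length)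
    (st : PySem.Dict Char Int × PySem.Set String × Int) (hInv : InvA cs k m st) :
    InvA cs k (m + 1) (stepA cs k st (m : Int)) := by
  obtain ⟨mp, res, start⟩ := st
  obtain ⟨H1, H0, Hle, Hlb, Hnd, HC, Hrn, Hres⟩ := hInv
  simp only at H1 H0 Hle Hlb Hnd HC Hrn Hres
  have hgetc : PySem.List.pyGetD cs (m : Int) ' ' = cs.getD m ' ' :=
    PySem.List.pyGetD_natCast cs m ' '
  set c := cs.getD m ' ' with hc
  have hlast := lastOccN_spec cs c m
  -- the post-adjustment value of start
  set s1 : Int := (match mp.get? c with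
    | some j => if j ≥ start then j + 1 else start
    | none => start) with hs1
  have hs1_none : lastOccN cs c m = none → s1 = start := by
    intro h; rw [hs1, H1 c, h]; rfl
  have hs1_some : ∀ j : Nat, lastOccN cs c m = some j →
      s1 = if (j : Int) ≥ start then (j : Int) + 1 else start := by
    intro j h; rw [hs1, H1 c, h]; rfl
  -- the new dict invariant (common to both branches)
  have hmp' : ∀ c', (mp.insert c (m : Int)).get? c' =
      (lastOccN cs c' (m + 1)).map (fun j => (j : Int)) := by
    intro c'
    by_cases hcc : c' = c
    · subst hcc
      rw [PySem.Dict.get?_insert_self]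
      have hl : lastOccN cs c (m + 1) = some m := by
        simp only [lastOccN]
        rw [← hc]
        simp
      rw [hl]
      rfl
    · rw [PySem.Dict.get?_insert_of_ne mp (m : Int) hcc]
      have hl : lastOccN cs c' (m + 1) = lastOccN cs c' m := by
        simp only [lastOccN]
        rw [← hc, if_neg (fun h => hcc h.symm)]
      rw [hl, H1 c']
  -- facts about s1
  have hs1_ge : start ≤ s1 := by
    cases holo : lastOccN cs c m with
    | none => rw [hs1_none holo]
    | some j => rw [hs1_some j holo]; split <;> omega
  have hs1_le : s1 ≤ (m : Int) := by
    cases holo : lastOccN cs c m with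
    | none => rw [hs1_none holo]; exact Hle
    | some j =>
      have hj := (hlast.2 j holo).1
      rw [hs1_some j holo]; split <;> omega
  have hs1_0 : 0 ≤ s1 := le_trans H0 hs1_ge
  have hs1_lb : (m : Int) + 1 - k ≤ s1 := le_trans Hlb hs1_ge
  have hs1_nd : (seg cs s1.toNat m).Nodup :=
    seg_nodup_mono_left cs (by omega) Hnd
  have hs1_notmem : c ∉ seg cs s1.toNat m := by
    intro hmem
    obtain ⟨i, hai, hib, hilen, hieq⟩ := mem_seg_elim cs hmem
    cases holo : lastOccN cs c m with
    | none => exact hlast.1 holo i hib hieq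
    | some j =>
      have hj := hlast.2 j holo
      have hjs : (j : Int) < s1 := by
        rw [hs1_some j holo]; split <;> omega
      exact hj.2.2 i (by omega) hib hieq
  have hs1_C : (m : Int) + 1 - k < s1 → 0 < s1 →
      ¬ (seg cs (s1.toNat - 1) (m + 1)).Nodup := by
    intro hlt hpos
    have hCold : s1 = start → ¬ (seg cs (s1.toNat - 1) (m + 1)).Nodup := by
      intro he
      have hcm := HC (by omega) (by omega)
      rw [he]
      exact seg_not_nodup_mono_right cs (by omega) hcm
    cases holo : lastOccN cs c m with
    | none => exact hCold (hs1_none holo)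
    | some j =>
      have hj := hlast.2 j holo
      by_cases hadj : (j : Int) ≥ start
      · -- adjusted: s1 = j + 1, and cs[j] = cs[m] = c gives a duplicate
        have hs1j : s1 = (j : Int) + 1 := by rw [hs1_some j holo, if_pos hadj]
        have hjn : s1.toNat - 1 = j := by omega
        rw [hjn, seg_cons cs (by omega) (by omega), hj.2.1]
        intro hnd2
        exact (List.nodup_cons.mp hnd2).1
          (mem_seg cs (by omega) (by omega) hm)
      · exact hCold (by rw [hs1_some j holo, if_neg hadj])
  -- the step reduces to an if on the add condition
  have hstep : stepA cs k (mp, res, start) (m : Int) =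
      (if (m : Int) - s1 + 1 = k then
        (mp.insert c (m : Int),
         PySem.Set.add res (String.ofList
           (PySem.List.slice cs (some s1) (some ((m : Int) + 1)))), s1 + 1)
      else (mp.insert c (m : Int), res, s1)) := by
    simp only [stepA, hgetc, ← hs1]
  rw [hstep]
  set kN := k.toNat with hkN
  have hkNk : (kN : Int) = k := Int.toNat_of_nonneg (by omega)
  by_cases hcond : (m : Int) - s1 + 1 = k
  · -- add branch
    rw [if_pos hcond]
    have hadd : s1 = (m : Int) + 1 - k := by omega
    have hjNk : s1.toNat + kN = m + 1 := by omega
    have hwin : (seg cs s1.toNat (m + 1)).Nodup := by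
      rw [seg_snoc cs (by omega) hm]
      refine List.Nodup.append hs1_nd (List.nodup_singleton _) ?_
      intro x hx hx2
      rw [List.mem_singleton] at hx2
      rw [← hc] at hx2
      subst hx2
      exact hs1_notmem hx
    have hslice : PySem.List.slice cs (some s1) (some ((m : Int) + 1)) =
        Wnd cs kN s1.toNat := by
      rw [PySem.List.slice_toNat cs hs1_0 (by omega), Wnd]
      congr 1
      omega
    refine ⟨hmp', ?_, ?_, ?_, ?_, ?_, ?_, ?_⟩
    · show (0 : Int) ≤ s1 + 1; omega
    · show s1 + 1 ≤ ((m + 1 : Nat) : Int); push_cast; omega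
    · show ((m + 1 : Nat) : Int) + 1 - k ≤ s1 + 1; push_cast; omega
    · show (seg cs (s1 + 1).toNat (m + 1)).Nodup
      have hn : (s1 + 1).toNat = s1.toNat + 1 := by omega
      rw [hn]
      exact seg_nodup_mono_left cs (by omega) hwin
    · show ((m + 1 : Nat) : Int) + 1 - k < s1 + 1 → _
      intro h1
      exact absurd h1 (by push_cast; omega)
    · show (PySem.Set.add res (String.ofList
        (PySem.List.slice cs (some s1) (some ((m : Int) + 1))))).Nodup
      exact PySem.Set.nodup_add _ _ Hrn
    · intro w
      show w ∈ PySem.Set.add res (String.ofList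
        (PySem.List.slice cs (some s1) (some ((m : Int) + 1)))) ↔ _
      rw [PySem.Set.mem_add, hslice]
      constructor
      · rintro (hw | hw)
        · obtain ⟨j, hj1, hj2, hj3⟩ := (Hres w).mp hw
          exact ⟨j, by omega, hj2, hj3⟩
        · refine ⟨s1.toNat, by omega, ?_, hw⟩
          rw [Wnd_eq_seg, hjNk]
          exact hwin
      · rintro ⟨j, hj1, hj2, hj3⟩
        by_cases hjm : j + kN ≤ m
        · exact Or.inl ((Hres w).mpr ⟨j, hjm, hj2, hj3⟩)
        · have hje : j = s1.toNat := by omega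
          subst hje
          exact Or.inr hj3
  · -- no-add branch
    rw [if_neg hcond]
    have hlt : (m : Int) + 1 - k < s1 := by omega
    have hsnoc : (seg cs s1.toNat (m + 1)).Nodup := by
      rw [seg_snoc cs (by omega) hm]
      refine List.Nodup.append hs1_nd (List.nodup_singleton _) ?_
      intro x hx hx2
      rw [List.mem_singleton] at hx2
      rw [← hc] at hx2
      subst hx2
      exact hs1_notmem hx
    refine ⟨hmp', ?_, ?_, ?_, hsnoc, ?_, Hrn, ?_⟩
    · show (0 : Int) ≤ s1; omega
    · show s1 ≤ ((m + 1 : Nat) : Int); push_cast; omega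
    · show ((m + 1 : Nat) : Int) + 1 - k ≤ s1; push_cast; omega
    · show ((m + 1 : Nat) : Int) + 1 - k < s1 → 0 < s1 → _
      intro h1 h2
      exact hs1_C (by omega) h2
    · intro w
      show w ∈ res ↔ _
      rw [Hres w]
      constructor
      · rintro ⟨j, hj1, hj2, hj3⟩
        exact ⟨j, by omega, hj2, hj3⟩
      · rintro ⟨j, hj1, hj2, hj3⟩
        by_cases hjm : j + kN ≤ m
        · exact ⟨j, hjm, hj2, hj3⟩
        · exfalso
          have hje : (j : Int) = (m : Int) + 1 - k := by omega
          have hpos : 0 < s1 := by omega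
          have hwnd : (seg cs j (m + 1)).Nodup := by
            rw [Wnd_eq_seg] at hj2
            have hsum : j + kN = m + 1 := by omega
            rwa [hsum] at hj2
          exact hs1_C hlt hpos
            (seg_nodup_mono_left cs (by omega) hwnd)

-- one unfolding of the loop
theorem stateA_succ (cs : List Char) (k : Int) (m : Nat) :
    stateA cs k (m + 1) = stepA cs k (stateA cs k m) (m : Int) := by
  unfold stateA
  rw [show ((m + 1 : Nat) : Int) = (m : Int) + 1 by push_cast; ring,
    PySem.List.pyRange_one_succ_right (show (0:Int) ≤ (m:Int) by omega), List.foldl_append]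
  rfl

-- the invariant holds along A's loop
theorem invA_holds (cs : List Char) (k : Int) (hk : 1 ≤ k) (m : Nat)
    (hm : m ≤ cs.length) : InvA cs k m (stateA cs k m) := by
  induction m with
  | zero =>
    have h0 : stateA cs k 0 = (PySem.Dict.empty, PySem.Set.empty, (0 : Int)) := by
      unfold stateA
      simp only [Nat.cast_zero]
      rw [PySem.List.pyRange_one_eq_nil (le_refl (0:Int))]
      rfl
    rw [h0]
    refine ⟨?_, show (0:Int) ≤ 0 by omega, show (0:Int) ≤ ((0:Nat):Int) by omega,
      show ((0:Nat):Int) + 1 - k ≤ 0 by push_cast; omega, ?_, ?_, ?_, ?_⟩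
    · intro c
      rw [PySem.Dict.get?_empty]
      rfl
    · show (seg cs (0 : Int).toNat 0).Nodup
      simp [seg]
    · show ((0:Nat):Int) + 1 - k < 0 → 0 < (0:Int) → _
      intro _ h
      omega
    · show (PySem.Set.empty (α := String)).Nodup
      simp [PySem.Set.empty]
    · intro w
      show w ∈ PySem.Set.empty ↔ _
      constructor
      · intro h
        exact absurd h (by simp [PySem.Set.empty])
      · rintro ⟨j, hj1, _, _⟩
        exfalso
        have : 1 ≤ k.toNat := by omega
        omega
  | succ m ih =>
    rw [stateA_succ]
    exact step_preserves cs k hk m (by omega) _ (ih (by omega))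

-- for k < 0, A's loop never adds anything
theorem negA (cs : List Char) (k : Int) (hk : k < 0) (m : Nat) (hm : m ≤ cs.length) :
    (∀ c, (stateA cs k m).1.get? c = (lastOccN cs c m).map (fun j => (j : Int))) ∧
    0 ≤ (stateA cs k m).2.2 ∧ (stateA cs k m).2.2 ≤ (m : Int) ∧
    (stateA cs k m).2.1 = [] := by
  induction m with
  | zero =>
    have h0 : stateA cs k 0 = (PySem.Dict.empty, PySem.Set.empty, (0 : Int)) := by
      unfold stateA
      simp only [Nat.cast_zero]
      rw [PySem.List.pyRange_one_eq_nil (le_refl (0:Int))]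
      rfl
    rw [h0]
    exact ⟨fun c => by rw [PySem.Dict.get?_empty]; rfl, show (0:Int) ≤ 0 by omega,
      show (0:Int) ≤ ((0:Nat):Int) by omega, rfl⟩
  | succ m ih =>
    obtain ⟨H1, H0, Hle, Hres⟩ := ih (by omega)
    rw [stateA_succ]
    rcases hst : stateA cs k m with ⟨mp, res, start⟩
    rw [hst] at H1 H0 Hle Hres
    simp only at H1 H0 Hle Hres
    have hgetc : PySem.List.pyGetD cs (m : Int) ' ' = cs.getD m ' ' :=
      PySem.List.pyGetD_natCast cs m ' '
    set c := cs.getD m ' ' with hc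
    have hlast := lastOccN_spec cs c m
    set s1 : Int := (match mp.get? c with
      | some j => if j ≥ start then j + 1 else start
      | none => start) with hs1
    have hs1_none : lastOccN cs c m = none → s1 = start := by
      intro h; rw [hs1, H1 c, h]; rfl
    have hs1_some : ∀ j : Nat, lastOccN cs c m = some j →
        s1 = if (j : Int) ≥ start then (j : Int) + 1 else start := by
      intro j h; rw [hs1, H1 c, h]; rfl
    have hs1_le : 0 ≤ s1 ∧ s1 ≤ (m : Int) := by
      cases holo : lastOccN cs c m with
      | none => rw [hs1_none holo]; exact ⟨H0, Hle⟩
      | some j =>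
        have hj := (hlast.2 j holo).1
        rw [hs1_some j holo]
        constructor <;> (split <;> omega)
    have hmp' : ∀ c', (mp.insert c (m : Int)).get? c' =
        (lastOccN cs c' (m + 1)).map (fun j => (j : Int)) := by
      intro c'
      by_cases hcc : c' = c
      · subst hcc
        rw [PySem.Dict.get?_insert_self]
        have hl : lastOccN cs c (m + 1) = some m := by
          simp only [lastOccN]
          rw [← hc]
          simp
        rw [hl]
        rfl
      · rw [PySem.Dict.get?_insert_of_ne mp (m : Int) hcc]
        have hl : lastOccN cs c' (m + 1) = lastOccN cs c' m := by
          simp only [lastOccN]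
          rw [← hc, if_neg (fun h => hcc h.symm)]
        rw [hl, H1 c']
    have hstep : stepA cs k (mp, res, start) (m : Int) =
        (if (m : Int) - s1 + 1 = k then
          (mp.insert c (m : Int),
           PySem.Set.add res (String.ofList
             (PySem.List.slice cs (some s1) (some ((m : Int) + 1)))), s1 + 1)
        else (mp.insert c (m : Int), res, s1)) := by
      simp only [stepA, hgetc, ← hs1]
    rw [hstep, if_neg (by omega)]
    refine ⟨hmp', show (0:Int) ≤ s1 by omega, ?_, Hres⟩
    show s1 ≤ ((m + 1 : Nat) : Int)
    push_cast
    omega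


-- membership in B's window set
theorem memB (cs : List Char) (k : Int) (hk : 1 ≤ k) (hkn : k ≤ (cs.length : Int)) (w : String) :
    w ∈ PySem.Set.ofList
      ((((PySem.List.pyRange 0 ((cs.length : Int) - k + 1) 1).map
          (fun i => PySem.List.slice cs (some i) (some (i + k)))).filter
        (fun v => ((PySem.Set.ofList v).length : Int) = k)).map String.ofList) ↔
    ∃ j : Nat, j + k.toNat ≤ cs.length ∧ (Wnd cs k.toNat j).Nodup ∧
      w = String.ofList (Wnd cs k.toNat j) := by
  rw [PySem.Set.mem_ofList, List.mem_map]
  constructor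
  · rintro ⟨v, hv, rfl⟩
    rw [List.mem_filter] at hv
    obtain ⟨hv1, hv2⟩ := hv
    rw [List.mem_map] at hv1
    obtain ⟨i, hi, rfl⟩ := hv1
    rw [PySem.List.mem_pyRange_one] at hi
    have h0i : 0 ≤ i := hi.1
    have hslice : PySem.List.slice cs (some i) (some (i + k)) = Wnd cs k.toNat i.toNat := by
      rw [PySem.List.slice_toNat cs h0i (by omega), Wnd]
      congr 1
      omega
    rw [hslice] at hv2 ⊢
    have hjk : i.toNat + k.toNat ≤ cs.length := by omega
    have hlen : (Wnd cs k.toNat i.toNat).length = k.toNat := by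
      simp [Wnd, List.length_take, List.length_drop]
      omega
    refine ⟨i.toNat, hjk, ?_, rfl⟩
    rw [decide_eq_true_iff] at hv2
    rw [← ofList_length_iff, hlen]
    omega
  · rintro ⟨j, hj, hnd, rfl⟩
    refine ⟨Wnd cs k.toNat j, ?_, rfl⟩
    rw [List.mem_filter]
    have hlen : (Wnd cs k.toNat j).length = k.toNat := by
      simp [Wnd, List.length_take, List.length_drop]
      omega
    constructor
    · rw [List.mem_map]
      refine ⟨(j : Int), ?_, ?_⟩
      · rw [PySem.List.mem_pyRange_one]
        omega
      · rw [PySem.List.slice_toNat cs (by omega) (by omega), Wnd]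
        congr 1
        omega
    · rw [decide_eq_true_iff, PySem.Set.ofList_eq_self_of_nodup _ hnd, hlen]
      omega

-- ===== VERDICT (by name: the statement is the Claim_ definition above) =====
theorem sub_string_k_spec : Claim_equal_sub_string_k := by
  unfold Claim_equal_sub_string_k
  intro s k _
  unfold Spec_sub_string_k
  by_cases hnil : s.toList = []
  · rw [sub_string_k, if_pos (Or.inl hnil), sub_string_k_alt,
      if_pos (by rw [hnil]; simp; omega)]
  by_cases hk0 : k = 0
  · rw [sub_string_k, if_pos (Or.inr hk0), sub_string_k_alt, if_pos (by omega)]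
  by_cases hkneg : k < 0
  · -- k < 0: A's loop never adds; both sides are []
    have hres := (negA s.toList k hkneg s.toList.length le_rfl).2.2.2
    rw [sub_string_k, if_neg (by push Not; exact ⟨hnil, hk0⟩),
      sub_string_k_alt, if_pos (Or.inl (by omega))]
    show PySem.List.sorted (stateA s.toList k s.toList.length).2.1 (fun x => x) false = []
    rw [hres]
    rfl
  -- now 1 ≤ k
  have hk : 1 ≤ k := by omega
  have hInv := invA_holds s.toList k hk s.toList.length le_rfl
  obtain ⟨_, _, _, _, _, _, HresNd, Hres⟩ := hInv
  rw [sub_string_k, if_neg (by push Not; exact ⟨hnil, hk0⟩)]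
  by_cases hkn : (s.toList.length : Int) < k
  · -- k > len(s): no window fits, A's set is empty
    rw [sub_string_k_alt, if_pos (Or.inr hkn)]
    show PySem.List.sorted (stateA s.toList k s.toList.length).2.1 (fun x => x) false = []
    have hres : (stateA s.toList k s.toList.length).2.1 = [] := by
      rw [List.eq_nil_iff_forall_not_mem]
      intro w hw
      obtain ⟨j, hj, _, _⟩ := (Hres w).mp hw
      omega
    rw [hres]
    rfl
  · -- main case: 1 ≤ k ≤ len(s)
    rw [sub_string_k_alt, if_neg (by push Not; omega)]
    show PySem.List.sorted (stateA s.toList k s.toList.length).2.1 (fun x => x) false = _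
    apply PySem.List.sorted_eq_sorted_of_perm _ _ _ (fun a b h => h)
    rw [List.perm_ext_iff_of_nodup HresNd (PySem.Set.nodup_ofList _)]
    intro w
    rw [Hres w, memB s.toList k hk (by omega) w]
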